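-- pv_equiv track=rewrite | github.com/rmovva/deeplift | deeplift/util.py | get_effective_width_and_stride
-- ===== SOURCE A (Python) =====
-- def get_effective_width_and_stride(widths,strides):
--     effectiveStride = strides[0]
--     effectiveWidth = widths[0]
--     assert len(strides)==len(widths)
--     if len(strides)>1:
--         for (stride, width) in zip(strides[1:],widths[1:]):
--             effectiveWidth = ((width-1)*effectiveStride)+effectiveWidth
--             effectiveStride = effectiveStride*stride
--     return effectiveWidth, effectiveStride
-- ===== SOURCE B (Python) =====
-- def get_effective_width_and_stride(widths, strides):
--     effectiveStride = strides[0]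
--     effectiveWidth = widths[0]
--     assert len(strides) == len(widths)
--     cum = [effectiveStride]
--     for s in strides[1:]:
--         cum.append(cum[-1] * s)
--     effectiveWidth = widths[0] + sum((w - 1) * c for w, c in zip(widths[1:], cum))
--     return effectiveWidth, cum[-1]
-- ===== Notes on version B (the rewrite author's own statement) =====
-- stated objective: alternative
-- what changed: Replaces the single interleaved running-state loop with a standalone prefix-product table of the strides plus a separate weighted-sum pass over zip(widths[1:], table).
import Mathlib
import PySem

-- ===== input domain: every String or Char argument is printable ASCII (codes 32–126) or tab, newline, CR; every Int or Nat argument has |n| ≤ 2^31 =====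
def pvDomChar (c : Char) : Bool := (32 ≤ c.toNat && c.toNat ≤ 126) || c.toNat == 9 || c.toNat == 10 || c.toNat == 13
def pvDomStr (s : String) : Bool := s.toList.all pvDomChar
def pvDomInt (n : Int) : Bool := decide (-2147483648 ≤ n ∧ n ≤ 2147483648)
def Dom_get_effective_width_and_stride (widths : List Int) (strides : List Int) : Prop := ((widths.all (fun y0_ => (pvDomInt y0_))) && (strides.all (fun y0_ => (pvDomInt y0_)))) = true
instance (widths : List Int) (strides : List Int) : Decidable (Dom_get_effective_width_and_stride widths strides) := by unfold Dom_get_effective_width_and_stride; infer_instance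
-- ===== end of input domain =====

-- B replaces A's single interleaved running-state loop by a prefix-product table of the
-- strides plus a separate weighted-sum pass (alternative decomposition, same cost).


-- ===== PORT A =====
def get_effective_width_and_stride (widths : List Int) (strides : List Int) : Int × Int :=
  let effectiveStride := (PySem.List.pyGet? strides 0).getD 0
  let effectiveWidth := (PySem.List.pyGet? widths 0).getD 0
  if strides.length > 1 then
    ((PySem.List.slice strides (some 1) none).zip (PySem.List.slice widths (some 1) none)).foldl
      (fun (st : Int × Int) (sw : Int × Int) => ((sw.2 - 1) * st.2 + st.1, st.2 * sw.1))
      (effectiveWidth, effectiveStride)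
  else
    (effectiveWidth, effectiveStride)

-- ===== PORT B =====
def get_effective_width_and_stride_alt (widths : List Int) (strides : List Int) : Int × Int :=
  let effectiveStride := (PySem.List.pyGet? strides 0).getD 0
  let effectiveWidth0 := (PySem.List.pyGet? widths 0).getD 0
  let cum := (PySem.List.slice strides (some 1) none).foldl
      (fun acc s => acc ++ [(PySem.List.pyGetD acc (-1) 0) * s]) [effectiveStride]
  let effectiveWidth := effectiveWidth0 +
      (((PySem.List.slice widths (some 1) none).zip cum).map (fun p => (p.1 - 1) * p.2)).sum
  (effectiveWidth, PySem.List.pyGetD cum (-1) 0)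

-- ===== PRECONDITION & SPEC =====
-- Pre_ excludes exactly the inputs on which A raises: empty strides (IndexError)
-- and mismatched lengths (AssertionError).
def Pre_get_effective_width_and_stride (widths : List Int) (strides : List Int) : Prop :=
  strides ≠ [] ∧ widths.length = strides.length
instance (widths : List Int) (strides : List Int) : Decidable (Pre_get_effective_width_and_stride widths strides) := by unfold Pre_get_effective_width_and_stride; infer_instance

def pvWitness_get_effective_width_and_stride : List Int × List Int := ([3, 5, 2], [1, 2, 2])

def Spec_get_effective_width_and_stride (widths : List Int) (strides : List Int) (out : Int × Int) : Prop := out = get_effective_width_and_stride_alt widths strides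
instance (widths : List Int) (strides : List Int) (out : Int × Int) : Decidable (Spec_get_effective_width_and_stride widths strides out) := by unfold Spec_get_effective_width_and_stride; infer_instance

-- ===== CLAIM (what is proved, stated in full; the proofs are below) =====
def Claim_equal_get_effective_width_and_stride : Prop := ∀ (widths : List Int) (strides : List Int), Dom_get_effective_width_and_stride widths strides → Pre_get_effective_width_and_stride widths strides → Spec_get_effective_width_and_stride widths strides (get_effective_width_and_stride widths strides)

-- ===== LEMMAS AND PROOFS =====

theorem pyGet0 (a : Int) (l : List Int) : (PySem.List.pyGet? (a :: l) 0).getD 0 = a := by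
  simp [PySem.List.pyGet?, PySem.List.pyIdx?]

/-- Prefix products `[s, s*x₁, s*x₁*x₂, …]` — the mathematical shape of B's `cum` table. -/
def prefixProds : Int → List Int → List Int
  | s, [] => [s]
  | s, x :: xs => s :: prefixProds (s * x) xs

theorem prefixProds_ne_nil (s : Int) (xs : List Int) : prefixProds s xs ≠ [] := by
  cases xs <;> simp [prefixProds]

theorem getLast?_prefixProds (xs : List Int) : ∀ s : Int, (prefixProds s xs).getLast? = some (s * xs.prod) := by
  induction xs with
  | nil => intro s; simp [prefixProds]
  | cons x xs ih =>
      intro s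
      rw [prefixProds, List.getLast?_cons, ih (s * x)]
      simp [mul_assoc]

theorem cum_build (xs : List Int) : ∀ (pre : List Int) (s : Int),
    xs.foldl (fun acc x => acc ++ [(PySem.List.pyGetD acc (-1) 0) * x]) (pre ++ [s])
      = pre ++ prefixProds s xs := by
  induction xs with
  | nil => intro pre s; simp [prefixProds]
  | cons x xs ih =>
      intro pre s
      rw [List.foldl_cons, PySem.List.pyGetD_neg_one_append_singleton]
      have : pre ++ [s] ++ [s * x] = (pre ++ [s]) ++ [s * x] := by simp
      rw [this, ih (pre ++ [s]) (s * x)]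
      simp [prefixProds]

theorem fold_A (ss : List Int) : ∀ (ws : List Int) (w s : Int), ss.length = ws.length →
    (ss.zip ws).foldl
      (fun (st : Int × Int) (sw : Int × Int) => ((sw.2 - 1) * st.2 + st.1, st.2 * sw.1)) (w, s)
      = (w + ((ws.zip (prefixProds s ss)).map (fun p => (p.1 - 1) * p.2)).sum, s * ss.prod) := by
  induction ss with
  | nil =>
      intro ws w s h
      cases ws with
      | nil => simp [prefixProds]
      | cons y ys => simp at h
  | cons x xs ih =>
      intro ws w s h
      cases ws with
      | nil => simp at h
      | cons y ys =>
          simp only [List.zip_cons_cons, List.foldl_cons, prefixProds, List.map_cons,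
            List.sum_cons, List.prod_cons]
          rw [ih ys ((y - 1) * s + w) (s * x) (by simpa using h)]
          simp only [Prod.mk.injEq]
          constructor <;> ring

theorem main_eq (widths strides : List Int)
    (hne : strides ≠ []) (hlen : widths.length = strides.length) :
    get_effective_width_and_stride widths strides
      = get_effective_width_and_stride_alt widths strides := by
  obtain ⟨s0, st, rfl⟩ := List.exists_cons_of_ne_nil hne
  obtain ⟨w0, wt, rfl⟩ : ∃ w0 wt, widths = w0 :: wt := by
    cases widths with
    | nil => simp at hlen
    | cons a l => exact ⟨a, l, rfl⟩
  have hlen' : st.length = wt.length := by simpa using hlen.symm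
  unfold get_effective_width_and_stride get_effective_width_and_stride_alt
  simp only [PySem.List.slice_from_one, List.tail_cons, pyGet0]
  rw [show ([s0] : List Int) = [] ++ [s0] from rfl, cum_build st [] s0]
  have hlast := getLast?_prefixProds st s0
  have hgd : PySem.List.pyGetD (prefixProds s0 st) (-1) 0 = s0 * st.prod := by
    rw [PySem.List.pyGetD_neg_one (d := 0) (h := prefixProds_ne_nil s0 st)]
    rw [List.getLast?_eq_some_getLast (prefixProds_ne_nil s0 st)] at hlast
    exact Option.some.inj hlast
  by_cases hgt : (s0 :: st).length > 1
  · simp only [hgt, if_pos]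
    rw [fold_A st wt w0 s0 hlen']
    simp [hgd]
  · have : st = [] := by cases st with | nil => rfl | cons a l => simp at hgt
    subst this
    have : wt = [] := by simpa using hlen'.symm
    subst this
    simp only [prefixProds, List.prod_nil, mul_one] at hgd
    simp [prefixProds, hgd]

-- ===== VERDICT (by name: the statement is the Claim_ definition above) =====
theorem get_effective_width_and_stride_spec : Claim_equal_get_effective_width_and_stride := by
  intro widths strides _ hpre
  exact main_eq widths strides hpre.1 hpre.2
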